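-- pv_equiv track=rewrite | github.com/YangliuDebugger/LeetCode-Solutions | company/Pinterest/reservation.py | FindAvailableSlots
-- ===== SOURCE A (Python) =====
-- import heapq
--
-- def FindAvailableSlots(start_time, end_time, total_capacity, reservation, K):
--     left = start_time
--     cnt = total_capacity
--     L = [[end_time, -total_capacity]]
--     for s, e, num in reservation:
--         L.append([s, -num])
--         L.append([e, num])
--     heapq.heapify(L)
--     res = []
--     while L:
--         right, num = heapq.heappop(L)
--         if left != right:
--             res.append([left, right, cnt])
--         cnt += num
--         left = right
--     return res
-- ===== SOURCE B (Python) =====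
-- def FindAvailableSlots(start_time, end_time, total_capacity, reservation, K):
--     times = {end_time}
--     for s, e, num in reservation:
--         times.add(s)
--         times.add(e)
--     res = []
--     left = start_time
--     for t in sorted(times):
--         if left != t:
--             occupied = sum(num * ((s < t) - (e < t)) for s, e, num in reservation)
--             capacity = total_capacity if t <= end_time else 0
--             res.append([left, t, capacity - occupied])
--         left = t
--     return res
-- ===== Notes on version B (the rewrite author's own statement) =====
-- stated objective: alternative
-- what changed: Replaces the heapify/heappop event sweep with a running capacity accumulator by collecting the distinct time coordinates into a set, sorting them, and recomputing the occupied capacity of each segment independently by a direct scan of the reservation list (no running count, no event/delta list at all).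
import Mathlib
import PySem

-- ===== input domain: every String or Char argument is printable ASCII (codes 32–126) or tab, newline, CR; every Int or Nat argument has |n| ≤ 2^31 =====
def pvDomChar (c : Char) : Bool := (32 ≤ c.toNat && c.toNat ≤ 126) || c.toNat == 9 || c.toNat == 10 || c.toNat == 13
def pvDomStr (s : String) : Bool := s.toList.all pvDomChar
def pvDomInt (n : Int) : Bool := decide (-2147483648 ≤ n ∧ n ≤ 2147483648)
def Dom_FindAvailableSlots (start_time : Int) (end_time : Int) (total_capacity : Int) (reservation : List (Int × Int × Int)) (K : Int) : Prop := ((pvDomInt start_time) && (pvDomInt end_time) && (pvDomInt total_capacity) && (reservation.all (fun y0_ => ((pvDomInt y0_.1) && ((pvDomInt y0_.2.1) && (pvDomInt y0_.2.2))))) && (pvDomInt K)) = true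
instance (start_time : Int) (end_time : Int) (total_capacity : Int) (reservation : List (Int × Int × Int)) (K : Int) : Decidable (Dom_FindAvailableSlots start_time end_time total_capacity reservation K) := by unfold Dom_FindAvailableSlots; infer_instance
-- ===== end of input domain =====

-- B drops A's event list / running-count sweep entirely: it collects the distinct time
-- coordinates into a set, sorts them, and recomputes each segment's occupied capacity
-- independently by a direct scan of the reservation list (objective: alternative algorithm).

-- ===== PORT A =====
-- Python list comparison [t, n] <= [t', n'] as heapq uses it (lexicographic).
def pvLexLe (a b : Int × Int) : Bool :=
  decide (a.1 < b.1) || (a.1 == b.1 && decide (a.2 ≤ b.2))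

-- heapq.heappop extracts the minimum under list comparison; ported as exact minimum
-- extraction (pop the first minimal element, return the rest).
def pvPopMin (x : Int × Int) : List (Int × Int) → (Int × Int) × List (Int × Int)
  | [] => (x, [])
  | y :: ys =>
    if pvLexLe x y then
      let p := pvPopMin x ys
      (p.1, y :: p.2)
    else
      let p := pvPopMin y ys
      (p.1, x :: p.2)

theorem pvPopMin_length (x : Int × Int) (l : List (Int × Int)) :
    (pvPopMin x l).2.length = l.length := by
  induction l generalizing x with
  | nil => rfl
  | cons y ys ih => by_cases h : pvLexLe x y <;> simp [pvPopMin, h, ih]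

-- the 'while L: right, num = heappop(L); …' loop of A
def pvSweepA (left cnt : Int) (res : List (List Int)) (L : List (Int × Int)) : List (List Int) :=
  match L with
  | [] => res
  | x :: xs =>
    let p := pvPopMin x xs
    pvSweepA p.1.1 (cnt + p.1.2) (res ++ if left ≠ p.1.1 then [[left, p.1.1, cnt]] else []) p.2
termination_by L.length
decreasing_by simp [pvPopMin_length]

def FindAvailableSlots (start_time : Int) (end_time : Int) (total_capacity : Int) (reservation : List (Int × Int × Int)) (K : Int) : List (List Int) :=
  let L := reservation.foldl (fun acc r => acc ++ [(r.1, -r.2.2), (r.2.1, r.2.2)])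
            [(end_time, -total_capacity)]
  -- heapq.heapify only rearranges the heap internally; with heappop ported as exact
  -- minimum extraction the popped value sequence is unchanged, so it is the identity here
  pvSweepA start_time total_capacity [] L

-- ===== PORT B =====
def FindAvailableSlots_alt (start_time : Int) (end_time : Int) (total_capacity : Int) (reservation : List (Int × Int × Int)) (K : Int) : List (List Int) :=
  let times : PySem.Set Int :=
    reservation.foldl (fun s r => (s.add r.1).add r.2.1) (PySem.Set.ofList [end_time])
  let st := (PySem.List.sorted times (fun t => t) false).foldl
    (fun (acc : Int × List (List Int)) t =>
      if acc.1 ≠ t then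
        let occupied := reservation.foldl
          (fun a r => a + r.2.2 * ((if r.1 < t then (1 : Int) else 0)
                                    - (if r.2.1 < t then (1 : Int) else 0))) 0
        let capacity := if t ≤ end_time then total_capacity else 0
        (t, acc.2 ++ [[acc.1, t, capacity - occupied]])
      else (t, acc.2))
    (start_time, ([] : List (List Int)))
  st.2

-- ===== PRECONDITION & SPEC =====
def Spec_FindAvailableSlots (start_time : Int) (end_time : Int) (total_capacity : Int) (reservation : List (Int × Int × Int)) (K : Int) (out : List (List Int)) : Prop := out = FindAvailableSlots_alt start_time end_time total_capacity reservation K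
instance (start_time : Int) (end_time : Int) (total_capacity : Int) (reservation : List (Int × Int × Int)) (K : Int) (out : List (List Int)) : Decidable (Spec_FindAvailableSlots start_time end_time total_capacity reservation K out) := by unfold Spec_FindAvailableSlots; infer_instance

-- ===== CLAIM (what is proved, stated in full; the proofs are below) =====
def Claim_equal_FindAvailableSlots : Prop := ∀ (start_time : Int) (end_time : Int) (total_capacity : Int) (reservation : List (Int × Int × Int)) (K : Int), Dom_FindAvailableSlots start_time end_time total_capacity reservation K → Spec_FindAvailableSlots start_time end_time total_capacity reservation K (FindAvailableSlots start_time end_time total_capacity reservation K)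

-- ===== LEMMAS AND PROOFS =====

-- one emitted segment
def pvSeg (left t cnt : Int) : List (List Int) := if left ≠ t then [[left, t, cnt]] else []

-- the sweep over an already-ordered event list
def pvSweepL (left cnt : Int) : List (Int × Int) → List (List Int)
  | [] => []
  | p :: rest => pvSeg left p.1 cnt ++ pvSweepL p.1 (cnt + p.2) rest

def pvIns (x : Int × Int) : List (Int × Int) → List (Int × Int)
  | [] => [x]
  | y :: ys => if pvLexLe x y then x :: y :: ys else y :: pvIns x ys

def pvIsort : List (Int × Int) → List (Int × Int)
  | [] => []
  | x :: xs => pvIns x (pvIsort xs)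

-- net delta of an event list at coordinate t
def pvSumAt (t : Int) : List (Int × Int) → Int
  | [] => 0
  | p :: ps => (if p.1 = t then p.2 else 0) + pvSumAt t ps

-- net delta of all events strictly below t
def pvSumBelow (t : Int) : List (Int × Int) → Int
  | [] => 0
  | p :: ps => (if p.1 < t then p.2 else 0) + pvSumBelow t ps

-- B's per-coordinate capacity value
def pvCnt (end_time total_capacity : Int) (reservation : List (Int × Int × Int)) (t : Int) : Int :=
  (if t ≤ end_time then total_capacity else 0)
    - reservation.foldl
        (fun a r => a + r.2.2 * ((if r.1 < t then (1 : Int) else 0)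
                                  - (if r.2.1 < t then (1 : Int) else 0))) 0

-- B's emitted segments as a recursion over the sorted coordinates
def pvEmitB (C : Int → Int) (left : Int) : List Int → List (List Int)
  | [] => []
  | t :: ts => pvSeg left t (C t) ++ pvEmitB C t ts

theorem pvLexLe_total (a b : Int × Int) : pvLexLe a b = true ∨ pvLexLe b a = true := by
  simp only [pvLexLe, Bool.or_eq_true, Bool.and_eq_true, decide_eq_true_eq, beq_iff_eq]
  omega

theorem pvLexLe_trans {a b c : Int × Int} (h1 : pvLexLe a b = true) (h2 : pvLexLe b c = true) :
    pvLexLe a c = true := by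
  simp only [pvLexLe, Bool.or_eq_true, Bool.and_eq_true, decide_eq_true_eq, beq_iff_eq] at *
  omega

theorem pvLexLe_antisymm {a b : Int × Int} (h1 : pvLexLe a b = true) (h2 : pvLexLe b a = true) :
    a = b := by
  simp only [pvLexLe, Bool.or_eq_true, Bool.and_eq_true, decide_eq_true_eq, beq_iff_eq] at *
  have : a.1 = b.1 ∧ a.2 = b.2 := by omega
  exact Prod.ext this.1 this.2

theorem pvLexLe_fst {a b : Int × Int} (h : pvLexLe a b = true) : a.1 ≤ b.1 := by
  simp only [pvLexLe, Bool.or_eq_true, Bool.and_eq_true, decide_eq_true_eq, beq_iff_eq] at h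
  omega

theorem pvIns_perm (x : Int × Int) (l : List (Int × Int)) : (pvIns x l).Perm (x :: l) := by
  induction l with
  | nil => rfl
  | cons y ys ih =>
    by_cases h : pvLexLe x y
    · simp [pvIns, h]
    · simp only [pvIns, h, if_neg]
      exact ((ih.cons y).trans (List.Perm.swap x y ys))

theorem pvLexLe_refl (a : Int × Int) : pvLexLe a a = true := by
  simp [pvLexLe]

theorem pvIns_sorted {x : Int × Int} {l : List (Int × Int)}
    (h : l.Pairwise (fun a b => pvLexLe a b = true)) :
    (pvIns x l).Pairwise (fun a b => pvLexLe a b = true) := by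
  induction l with
  | nil => simp [pvIns]
  | cons y ys ih =>
    rcases List.pairwise_cons.mp h with ⟨hy, hys⟩
    by_cases hxy : pvLexLe x y = true
    · rw [pvIns, if_pos hxy]
      refine List.pairwise_cons.mpr ⟨?_, h⟩
      intro z hz
      rcases List.mem_cons.mp hz with rfl | hz'
      · exact hxy
      · exact pvLexLe_trans hxy (hy z hz')
    · have hyx : pvLexLe y x = true := (pvLexLe_total x y).resolve_left hxy
      rw [pvIns, if_neg hxy]
      refine List.pairwise_cons.mpr ⟨?_, ih hys⟩
      intro z hz
      rcases List.mem_cons.mp ((pvIns_perm x ys).mem_iff.mp hz) with rfl | hz'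
      · exact hyx
      · exact hy z hz'

theorem pvIsort_perm (l : List (Int × Int)) : (pvIsort l).Perm l := by
  induction l with
  | nil => rfl
  | cons x xs ih => exact (pvIns_perm x (pvIsort xs)).trans (ih.cons x)

theorem pvIsort_sorted (l : List (Int × Int)) :
    (pvIsort l).Pairwise (fun a b => pvLexLe a b = true) := by
  induction l with
  | nil => simp [pvIsort]
  | cons x xs ih => exact pvIns_sorted ih

theorem pvPopMin_perm (x : Int × Int) (l : List (Int × Int)) :
    ((pvPopMin x l).1 :: (pvPopMin x l).2).Perm (x :: l) := by
  induction l generalizing x with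
  | nil => rfl
  | cons y ys ih =>
    by_cases h : pvLexLe x y = true
    · rw [pvPopMin, if_pos h]
      exact ((List.Perm.swap y _ _).trans ((ih x).cons y)).trans (List.Perm.swap x y ys)
    · rw [pvPopMin, if_neg h]
      exact (List.Perm.swap x _ _).trans ((ih y).cons x)

theorem pvPopMin_min (x : Int × Int) (l : List (Int × Int)) :
    ∀ y ∈ x :: l, pvLexLe (pvPopMin x l).1 y = true := by
  induction l generalizing x with
  | nil =>
    intro y hy
    rcases List.mem_singleton.mp hy with rfl
    exact pvLexLe_refl y
  | cons z zs ih =>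
    intro y hy
    by_cases h : pvLexLe x z = true
    · rw [pvPopMin, if_pos h]
      rcases List.mem_cons.mp hy with rfl | hy'
      · exact ih y y (by simp)
      · rcases List.mem_cons.mp hy' with rfl | hy''
        · exact pvLexLe_trans (ih x x (by simp)) h
        · exact ih x y (List.mem_cons_of_mem _ hy'')
    · have hzx : pvLexLe z x = true := (pvLexLe_total x z).resolve_left h
      rw [pvPopMin, if_neg h]
      rcases List.mem_cons.mp hy with rfl | hy'
      · exact pvLexLe_trans (ih z z (by simp)) hzx
      · rcases List.mem_cons.mp hy' with rfl | hy''
        · exact ih y y (by simp)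
        · exact ih z y (List.mem_cons_of_mem _ hy'')

theorem pvIsort_cons_popMin (x : Int × Int) (xs : List (Int × Int)) :
    pvIsort (x :: xs) = (pvPopMin x xs).1 :: pvIsort (pvPopMin x xs).2 := by
  have hperm : (pvIsort (x :: xs)).Perm ((pvPopMin x xs).1 :: pvIsort (pvPopMin x xs).2) :=
    ((pvIsort_perm _).trans (pvPopMin_perm x xs).symm).trans
      (((pvIsort_perm _).symm).cons _)
  refine List.eq_of_perm_of_sorted (fun a b _ _ h1 h2 => pvLexLe_antisymm h1 h2)
      (pvIsort_sorted _) ?_ hperm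
  refine List.pairwise_cons.mpr ⟨?_, pvIsort_sorted _⟩
  intro z hz
  have hz' : z ∈ (pvPopMin x xs).2 := (pvIsort_perm _).mem_iff.mp hz
  exact pvPopMin_min x xs z ((pvPopMin_perm x xs).subset (List.mem_cons_of_mem _ hz'))

theorem pvSweepA_eq (n : Nat) :
    ∀ (L : List (Int × Int)), L.length = n → ∀ left cnt res,
      pvSweepA left cnt res L = res ++ pvSweepL left cnt (pvIsort L) := by
  induction n using Nat.strong_induction_on with
  | _ n ih =>
    intro L hL left cnt res
    cases L with
    | nil => simp [pvSweepA, pvIsort, pvSweepL]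
    | cons x xs =>
      rw [pvSweepA]
      have hlen : (pvPopMin x xs).2.length < n := by
        rw [pvPopMin_length]; simp at hL; omega
      rw [ih _ hlen _ rfl]
      rw [pvIsort_cons_popMin]
      simp [pvSweepL, pvSeg, List.append_assoc]

theorem pvSumAt_append (t : Int) (l₁ l₂ : List (Int × Int)) :
    pvSumAt t (l₁ ++ l₂) = pvSumAt t l₁ + pvSumAt t l₂ := by
  induction l₁ with
  | nil => simp [pvSumAt]
  | cons p ps ih => simp [pvSumAt, ih]; ring

theorem pvSumAt_eq_zero {t : Int} {l : List (Int × Int)} (h : ∀ p ∈ l, p.1 ≠ t) :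
    pvSumAt t l = 0 := by
  induction l with
  | nil => rfl
  | cons p ps ih =>
    simp [pvSumAt, h p (by simp), ih (fun q hq => h q (by simp [hq]))]

-- consuming a run of events at the same coordinate emits nothing and adds their deltas
theorem pvSweepL_run {t₀ : Int} (run : List (Int × Int)) (h : ∀ q ∈ run, q.1 = t₀) :
    ∀ c rest, pvSweepL t₀ c (run ++ rest) = pvSweepL t₀ (c + pvSumAt t₀ run) rest := by
  induction run with
  | nil => intro c rest; simp [pvSumAt]
  | cons q qs ih =>
    intro c rest
    have hq : q.1 = t₀ := h q (by simp)
    have step : pvSweepL t₀ c ((q :: qs) ++ rest) = pvSweepL t₀ (c + q.2) (qs ++ rest) := by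
      simp [pvSweepL, pvSeg, hq]
    rw [step, ih (fun p hp => h p (by simp [hp])) (c + q.2) rest]
    have hs : pvSumAt t₀ (q :: qs) = q.2 + pvSumAt t₀ qs := by
      show (if q.1 = t₀ then q.2 else 0) + pvSumAt t₀ qs = _
      rw [if_pos hq]
    rw [hs]
    have : c + q.2 + pvSumAt t₀ qs = c + (q.2 + pvSumAt t₀ qs) := by ring
    rw [this]

theorem pv_dropWhile_gt (t₀ : Int) (l : List (Int × Int))
    (hp : l.Pairwise (fun a b => a.1 ≤ b.1)) (hge : ∀ p ∈ l, t₀ ≤ p.1) :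
    ∀ p ∈ l.dropWhile (fun q => q.1 == t₀), t₀ < p.1 := by
  induction l with
  | nil => simp
  | cons a as ih =>
    rcases List.pairwise_cons.mp hp with ⟨ha, has⟩
    rw [List.dropWhile_cons]
    by_cases h : a.1 = t₀
    · rw [if_pos (by simp [h])]
      exact ih has (fun p hp' => by have := ha p hp'; omega)
    · rw [if_neg (by simp [h])]
      intro p hpmem
      rcases List.mem_cons.mp hpmem with rfl | hpas
      · have := hge p (by simp); omega
      · have h1 := hge a (by simp)
        have h2 := ha p hpas
        omega

-- the core sweep aggregation lemma: a coordinate-sorted event list sweeps to the same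
-- segments as one aggregated event per distinct coordinate, in increasing order
theorem pvSweep_agg (ks : List Int) :
    ∀ (l : List (Int × Int)) (left cnt : Int),
      l.Pairwise (fun a b => a.1 ≤ b.1) → ks.Pairwise (· < ·) →
      (∀ t, t ∈ ks ↔ t ∈ l.map Prod.fst) →
      pvSweepL left cnt l = pvSweepL left cnt (ks.map (fun t => (t, pvSumAt t l))) := by
  induction ks with
  | nil =>
    intro l left cnt _ _ hmem
    cases l with
    | nil => rfl
    | cons p l' =>
      have : p.1 ∈ ([] : List Int) := (hmem p.1).mpr (List.mem_map.mpr ⟨p, by simp, rfl⟩)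
      simp at this
  | cons t₀ ks' ih =>
    intro l left cnt hsort hks hmem
    cases l with
    | nil =>
      have : t₀ ∈ ([] : List (Int × Int)).map Prod.fst := (hmem t₀).mp (by simp)
      simp at this
    | cons p l' =>
      rcases List.pairwise_cons.mp hsort with ⟨hple, hsort'⟩
      rcases List.pairwise_cons.mp hks with ⟨ht₀lt, hks'⟩
      have hpt : p.1 = t₀ := by
        have h1 : p.1 ∈ t₀ :: ks' := (hmem p.1).mpr (List.mem_map.mpr ⟨p, by simp, rfl⟩)
        rcases List.mem_cons.mp h1 with h1 | h1
        · exact h1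
        · exfalso
          have h2 : t₀ < p.1 := ht₀lt _ h1
          have h3 : t₀ ∈ (p :: l').map Prod.fst := (hmem t₀).mp (by simp)
          rcases List.mem_map.mp h3 with ⟨q, hq, hqt⟩
          rcases List.mem_cons.mp hq with rfl | hq'
          · omega
          · have := hple q hq'; omega
      have hsplit : l' = l'.takeWhile (fun q => q.1 == t₀) ++ l'.dropWhile (fun q => q.1 == t₀) :=
        (List.takeWhile_append_dropWhile).symm
      set run := l'.takeWhile (fun q => q.1 == t₀)
      set rest := l'.dropWhile (fun q => q.1 == t₀)
      have hrun : ∀ q ∈ run, q.1 = t₀ := by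
        intro q hq
        have := List.mem_takeWhile_imp hq
        simpa using this
      have hge : ∀ q ∈ l', t₀ ≤ q.1 := fun q hq => hpt ▸ hple q hq
      have hgt : ∀ q ∈ rest, t₀ < q.1 := pv_dropWhile_gt t₀ l' hsort' hge
      have hrest_sub : ∀ q ∈ rest, q ∈ l' := fun q hq => (List.dropWhile_sublist _).mem hq
      have hrest_sort : rest.Pairwise (fun a b => a.1 ≤ b.1) :=
        hsort'.sublist (List.dropWhile_sublist _)
      have hsum0 : pvSumAt t₀ rest = 0 :=
        pvSumAt_eq_zero (fun q hq => by have := hgt q hq; omega)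
      have hsuml : pvSumAt t₀ (p :: l') = p.2 + pvSumAt t₀ run := by
        show (if p.1 = t₀ then p.2 else 0) + pvSumAt t₀ l' = _
        rw [if_pos hpt, hsplit, pvSumAt_append, hsum0]
        ring
      have hrunz : ∀ t ∈ ks', pvSumAt t run = 0 := by
        intro t ht
        have : t₀ < t := ht₀lt t ht
        exact pvSumAt_eq_zero (fun q hq => by have := hrun q hq; omega)
      have hsum_rest : ∀ t ∈ ks', pvSumAt t (p :: l') = pvSumAt t rest := by
        intro t ht
        have htgt : t₀ < t := ht₀lt t ht
        show (if p.1 = t then p.2 else 0) + pvSumAt t l' = _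
        rw [if_neg (by omega), hsplit, pvSumAt_append, hrunz t ht]
        ring
      have hmem' : ∀ t, t ∈ ks' ↔ t ∈ rest.map Prod.fst := by
        intro t
        constructor
        · intro ht
          have htgt : t₀ < t := ht₀lt t ht
          have h1 : t ∈ (p :: l').map Prod.fst := (hmem t).mp (by simp [ht])
          rcases List.mem_map.mp h1 with ⟨q, hq, hqt⟩
          rcases List.mem_cons.mp hq with rfl | hq'
          · omega
          · rw [hsplit] at hq'
            rcases List.mem_append.mp hq' with hq'' | hq''
            · have := hrun q hq''; omega
            · exact List.mem_map.mpr ⟨q, hq'', hqt⟩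
        · intro ht
          rcases List.mem_map.mp ht with ⟨q, hq, hqt⟩
          have h1 : t ∈ (p :: l').map Prod.fst :=
            List.mem_map.mpr ⟨q, List.mem_cons_of_mem _ (hrest_sub q hq), hqt⟩
          rcases List.mem_cons.mp ((hmem t).mpr h1) with rfl | h2
          · exfalso; have := hgt q hq; omega
          · exact h2
      have hLHS : pvSweepL left cnt (p :: l')
          = pvSeg left t₀ cnt ++ pvSweepL t₀ (cnt + pvSumAt t₀ (p :: l')) rest := by
        have h0 : pvSweepL left cnt (p :: l')
            = pvSeg left p.1 cnt ++ pvSweepL p.1 (cnt + p.2) l' := rfl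
        rw [h0, hpt]
        conv_lhs => rw [hsplit]
        rw [pvSweepL_run run hrun, hsuml]
        have : cnt + p.2 + pvSumAt t₀ run = cnt + (p.2 + pvSumAt t₀ run) := by ring
        rw [this]
      rw [hLHS]
      simp only [List.map_cons, pvSweepL]
      congr 1
      rw [ih rest t₀ (cnt + pvSumAt t₀ (p :: l')) hrest_sort hks' hmem']
      congr 1
      exact List.map_congr_left (fun t ht => by rw [hsum_rest t ht])

theorem pvSumAt_perm {l₁ l₂ : List (Int × Int)} (h : l₁.Perm l₂) (t : Int) :
    pvSumAt t l₁ = pvSumAt t l₂ := by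
  induction h with
  | nil => rfl
  | cons x _ ih => simp [pvSumAt, ih]
  | swap a b l =>
    show (if b.1 = t then b.2 else 0) + ((if a.1 = t then a.2 else 0) + pvSumAt t l)
        = (if a.1 = t then a.2 else 0) + ((if b.1 = t then b.2 else 0) + pvSumAt t l)
    ring
  | trans _ _ ih₁ ih₂ => exact ih₁.trans ih₂

-- ===== B-side lemmas =====

-- B's fold is pvEmitB
theorem pvFoldB_eq (et cap : Int) (resv : List (Int × Int × Int)) (ks : List Int) :
    ∀ left (res : List (List Int)),
      (ks.foldl
        (fun (acc : Int × List (List Int)) t =>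
          if acc.1 ≠ t then
            let occupied := resv.foldl
              (fun a r => a + r.2.2 * ((if r.1 < t then (1 : Int) else 0)
                                        - (if r.2.1 < t then (1 : Int) else 0))) 0
            let capacity := if t ≤ et then cap else 0
            (t, acc.2 ++ [[acc.1, t, capacity - occupied]])
          else (t, acc.2))
        (left, res)).2
      = res ++ pvEmitB (pvCnt et cap resv) left ks := by
  induction ks with
  | nil => intro left res; simp [pvEmitB]
  | cons t ts ih =>
    intro left res
    rw [List.foldl_cons]
    by_cases h : left ≠ t
    · simp only [if_pos h]
      rw [ih]
      simp [pvEmitB, pvSeg, pvCnt, h, List.append_assoc]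
    · simp only [if_neg h]
      rw [ih]
      simp at h
      simp [pvEmitB, pvSeg, h]

-- the aggregated sweep equals B's emission when C names the running count in closed form
theorem pvEmit_sweep (δ C : Int → Int) :
    ∀ (ks : List Int), ks.Pairwise (· < ·) →
    ∀ left c, (∀ t ∈ ks, C t = c + ((ks.filter (fun u => decide (u < t))).map δ).sum) →
      pvSweepL left c (ks.map (fun t => (t, δ t))) = pvEmitB C left ks := by
  intro ks
  induction ks with
  | nil => intro _ left c _; rfl
  | cons t₀ ts ih =>
    intro hp left c hC
    rcases List.pairwise_cons.mp hp with ⟨ht₀, hts⟩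
    have hCt₀ : C t₀ = c := by
      have := hC t₀ (by simp)
      have hfilt : (t₀ :: ts).filter (fun u => decide (u < t₀)) = [] := by
        rw [List.filter_eq_nil_iff]
        intro u hu
        rcases List.mem_cons.mp hu with rfl | hu'
        · simp
        · have := ht₀ u hu'; simp; omega
      rw [hfilt] at this
      simpa using this
    have hC' : ∀ t ∈ ts, C t = (c + δ t₀) + ((ts.filter (fun u => decide (u < t))).map δ).sum := by
      intro t ht
      have := hC t (List.mem_cons_of_mem _ ht)
      have hlt : t₀ < t := ht₀ t ht
      rw [List.filter_cons, if_pos (by simpa using hlt)] at this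
      simp only [List.map_cons, List.sum_cons] at this
      omega
    simp only [List.map_cons, pvSweepL, pvEmitB, hCt₀]
    congr 1
    exact ih hts t₀ (c + δ t₀) hC'

-- splitting pvSumBelow over the distinct coordinates
theorem pv_sum_if_mem {v a : Int} {l : List Int} (hnd : l.Nodup) :
    (l.map (fun u => if a = u then v else 0)).sum = if a ∈ l then v else 0 := by
  induction l with
  | nil => simp
  | cons x xs ih =>
    rcases List.nodup_cons.mp hnd with ⟨hx, hxs⟩
    simp only [List.map_cons, List.sum_cons, ih hxs]
    by_cases h : a = x
    · subst h
      rw [if_pos rfl, if_neg hx, if_pos (by simp)]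
      ring
    · rw [if_neg h]
      by_cases h2 : a ∈ xs
      · rw [if_pos h2, if_pos (by simp [h2])]
        ring
      · rw [if_neg h2, if_neg (by simp [h, h2])]
        ring

theorem pvSumBelow_part (ks : List Int) (hnd : ks.Nodup) :
    ∀ (E : List (Int × Int)), (∀ c ∈ E.map Prod.fst, c ∈ ks) →
    ∀ t, pvSumBelow t E = ((ks.filter (fun u => decide (u < t))).map (fun u => pvSumAt u E)).sum := by
  intro E
  induction E with
  | nil =>
    intro _ t
    simp [pvSumBelow, pvSumAt]
  | cons p E' ih =>
    intro hsub t
    have hsub' : ∀ c ∈ E'.map Prod.fst, c ∈ ks := by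
      intro c hc; exact hsub c (by simp at hc ⊢; tauto)
    have hp1 : p.1 ∈ ks := hsub p.1 (by simp)
    have hsplit :
        ((ks.filter (fun u => decide (u < t))).map (fun u => pvSumAt u (p :: E'))).sum
          = ((ks.filter (fun u => decide (u < t))).map (fun u => if p.1 = u then p.2 else 0)).sum
            + ((ks.filter (fun u => decide (u < t))).map (fun u => pvSumAt u E')).sum := by
      induction (ks.filter (fun u => decide (u < t))) with
      | nil => simp
      | cons x xs ih2 =>
        simp only [List.map_cons, List.sum_cons, ih2]
        show (if p.1 = x then p.2 else 0) + pvSumAt x E' + _ = _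
        ring
    rw [hsplit]
    have hnd' : (ks.filter (fun u => decide (u < t))).Nodup := hnd.filter _
    rw [pv_sum_if_mem hnd']
    have hmemf : p.1 ∈ ks.filter (fun u => decide (u < t)) ↔ p.1 < t := by
      rw [List.mem_filter]
      simp [hp1]
    show (if p.1 < t then p.2 else 0) + pvSumBelow t E' = _
    rw [ih hsub' t]
    by_cases h : p.1 < t
    · rw [if_pos h, if_pos (hmemf.mpr h)]
    · rw [if_neg h, if_neg (fun hh => h (hmemf.mp hh))]

-- B's closed-form count is the initial capacity plus the net delta of all earlier events
theorem pvCnt_eq (et cap : Int) (resv : List (Int × Int × Int)) (t : Int) :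
    pvCnt et cap resv t
      = cap + pvSumBelow t ((et, -cap) :: resv.flatMap (fun r => [(r.1, -r.2.2), (r.2.1, r.2.2)])) := by
  have hfold : ∀ (a0 : Int),
      resv.foldl (fun a r => a + r.2.2 * ((if r.1 < t then (1 : Int) else 0)
                                           - (if r.2.1 < t then (1 : Int) else 0))) a0
        = a0 - pvSumBelow t (resv.flatMap (fun r => [(r.1, -r.2.2), (r.2.1, r.2.2)])) := by
    induction resv with
    | nil => intro a0; simp [pvSumBelow]
    | cons r rs ih =>
      intro a0
      rw [List.foldl_cons, List.flatMap_cons, ih]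
      show _ = a0 - ((if r.1 < t then -r.2.2 else 0) + ((if r.2.1 < t then r.2.2 else 0) + _))
      by_cases h1 : r.1 < t <;> by_cases h2 : r.2.1 < t <;> simp [h1, h2] <;> ring
  unfold pvCnt
  rw [hfold]
  show _ = cap + ((if et < t then -cap else 0) + _)
  by_cases h : t ≤ et
  · rw [if_pos h, if_neg (by omega)]
    ring
  · rw [if_neg h, if_pos (by omega)]
    ring

theorem pv_foldl_app {A B : Type} (l : List A) (f : A -> List B) :
    forall acc : List B, l.foldl (fun a x => a ++ f x) acc = acc ++ l.flatMap f := by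
  induction l with
  | nil => intro acc; simp
  | cons x xs ih => intro acc; simp [ih]

-- the set of coordinates B builds is set(et :: flattened coordinates)
theorem pvTimes_eq (et : Int) (resv : List (Int × Int × Int)) :
    resv.foldl (fun (s : PySem.Set Int) r => (s.add r.1).add r.2.1) (PySem.Set.ofList [et])
      = PySem.Set.ofList (et :: resv.flatMap (fun r => [r.1, r.2.1])) := by
  have h : ∀ (s0 : PySem.Set Int),
      resv.foldl (fun s r => (s.add r.1).add r.2.1) s0
        = (resv.flatMap (fun r => [r.1, r.2.1])).foldl PySem.Set.add s0 := by
    induction resv with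
    | nil => intro s0; rfl
    | cons r rs ih => intro s0; rw [List.foldl_cons, List.flatMap_cons, List.foldl_append]; exact ih _
  rw [h, PySem.Set.ofList_eq_foldl]
  rfl

-- ===== VERDICT (by name: the statement is the Claim_ definition above) =====
theorem FindAvailableSlots_spec : Claim_equal_FindAvailableSlots := by
  intro st et cap resv K _
  unfold Spec_FindAvailableSlots
  set E : List (Int × Int) :=
    (et, -cap) :: resv.flatMap (fun r => [(r.1, -r.2.2), (r.2.1, r.2.2)]) with hEdef
  have hcoords : E.map Prod.fst = et :: resv.flatMap (fun r => [r.1, r.2.1]) := by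
    rw [hEdef]
    simp [List.map_flatMap, Function.comp]
  set ks := PySem.List.sorted (PySem.Set.ofList (et :: resv.flatMap (fun r => [r.1, r.2.1])))
      (fun t => t) false with hks
  have hkslt : ks.Pairwise (· < ·) := PySem.List.sorted_ofList_pairwise_lt _
  have hksnd : ks.Nodup := hkslt.nodup
  have hksmemE : ∀ t, t ∈ ks ↔ t ∈ E.map Prod.fst := by
    intro t
    rw [hks, PySem.List.mem_sorted, PySem.Set.mem_ofList, hcoords]
  -- A's side
  have hE : resv.foldl (fun acc r => acc ++ [(r.1, -r.2.2), (r.2.1, r.2.2)]) [(et, -cap)] = E := by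
    rw [pv_foldl_app]
    rfl
  have hA : FindAvailableSlots st et cap resv K = pvSweepL st cap (pvIsort E) := by
    simp only [FindAvailableSlots]
    rw [hE]
    exact pvSweepA_eq E.length E rfl st cap []
  -- B's side
  have hB : FindAvailableSlots_alt st et cap resv K = pvEmitB (pvCnt et cap resv) st ks := by
    simp only [FindAvailableSlots_alt]
    rw [pvTimes_eq]
    exact pvFoldB_eq et cap resv ks st []
  rw [hA, hB]
  -- connect through the aggregated sweep
  have hmemI : ∀ t, t ∈ ks ↔ t ∈ (pvIsort E).map Prod.fst := by
    intro t
    rw [hksmemE t]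
    exact (((pvIsort_perm E).map Prod.fst).mem_iff).symm
  rw [pvSweep_agg ks (pvIsort E) st cap
    ((pvIsort_sorted E).imp (fun h => pvLexLe_fst h)) hkslt hmemI]
  have hδ : ks.map (fun t => (t, pvSumAt t (pvIsort E))) = ks.map (fun t => (t, pvSumAt t E)) :=
    List.map_congr_left (fun t _ => by rw [pvSumAt_perm (pvIsort_perm E) t])
  rw [hδ]
  apply pvEmit_sweep
  · exact hkslt
  · intro t ht
    rw [pvCnt_eq et cap resv t]
    congr 1
    exact pvSumBelow_part ks hksnd E (fun c hc => (hksmemE c).mpr hc) t
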